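-- pv_equiv track=rewrite | github.com/pterodactylys/Handwriting_OCR-spbu | src/decode.py | collapse_ctc_tokens
-- ===== SOURCE A (Python) =====
-- from typing import Sequence
--
-- def collapse_ctc_tokens(token_ids: Sequence[int], blank_index: int = 0) -> list[int]:
--     collapsed: list[int] = []
--     previous = None
--     for token_id in token_ids:
--         if token_id != blank_index and token_id != previous:
--             collapsed.append(int(token_id))
--         previous = int(token_id)
--     return collapsed
-- ===== SOURCE B (Python) =====
-- def collapse_ctc_tokens(token_ids, blank_index=0):
--     def keys(xs):
--         # run keys (first element of each maximal run) by divide and conquer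
--         if len(xs) <= 1:
--             return list(xs)
--         mid = len(xs) // 2
--         left = keys(xs[:mid])
--         right = keys(xs[mid:])
--         if xs[mid] == xs[mid - 1]:
--             right = right[1:]
--         return left + right
--     return [int(k) for k in keys(list(token_ids)) if k != blank_index]
-- ===== Notes on version B (the rewrite author's own statement) =====
-- stated objective: alternative
-- what changed: Replaces the linear previous-element tracking loop with a divide-and-conquer: recursively compute the run keys of each half, drop the right half's first key when the run straddles the split, concatenate, then filter out the blank index.
import Mathlib
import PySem

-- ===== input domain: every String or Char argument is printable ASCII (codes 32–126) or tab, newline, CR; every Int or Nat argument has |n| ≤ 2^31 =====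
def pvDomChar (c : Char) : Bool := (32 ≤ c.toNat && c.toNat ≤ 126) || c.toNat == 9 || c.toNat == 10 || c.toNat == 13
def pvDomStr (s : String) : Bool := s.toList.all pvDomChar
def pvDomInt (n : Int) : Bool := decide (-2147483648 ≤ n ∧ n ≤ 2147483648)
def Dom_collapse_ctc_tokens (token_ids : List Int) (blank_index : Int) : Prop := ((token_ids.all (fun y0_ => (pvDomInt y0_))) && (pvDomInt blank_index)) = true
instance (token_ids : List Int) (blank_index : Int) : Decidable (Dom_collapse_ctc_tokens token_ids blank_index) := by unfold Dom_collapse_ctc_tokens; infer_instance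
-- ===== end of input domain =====

-- B replaces A's previous-element tracking loop with a divide-and-conquer merge of run keys (then a blank filter); an alternative algorithm of similar cost, not claimed faster.


-- ===== PORT A =====
-- A's for-loop: state = (collapsed so far, previous : Option Int, none = Python's None)
def ctcLoopA (blank_index : Int) (acc : List Int) (previous : Option Int) : List Int → List Int
  | [] => acc
  | t :: ts =>
    ctcLoopA blank_index (if t ≠ blank_index ∧ some t ≠ previous then acc ++ [t] else acc) (some t) ts

def collapse_ctc_tokens (token_ids : List Int) (blank_index : Int) : List Int :=
  ctcLoopA blank_index [] none token_ids

-- ===== PORT B =====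
-- Source B's `keys`: divide and conquer.  xs[:mid] / xs[mid:] with 0 ≤ mid ≤ len are exactly
-- List.take mid / List.drop mid; xs[mid], xs[mid-1] are in range here, ported via pyGet?
-- (compared as Options, which for in-range indices is exactly Python's == on the elements).
def dcKeys (xs : List Int) : List Int :=
  if _h : xs.length ≤ 1 then xs
  else
    let mid := xs.length / 2
    let left := dcKeys (xs.take mid)
    let right := dcKeys (xs.drop mid)
    left ++ (if PySem.List.pyGet? xs (mid : Int) = PySem.List.pyGet? xs ((mid : Int) - 1)
             then right.tail else right)
termination_by xs.length
decreasing_by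
  · simp only [List.length_take]; omega
  · simp only [List.length_drop]; omega

def collapse_ctc_tokens_alt (token_ids : List Int) (blank_index : Int) : List Int :=
  (dcKeys token_ids).filter (fun k => k ≠ blank_index)

-- ===== PRECONDITION & SPEC =====
def Spec_collapse_ctc_tokens (token_ids : List Int) (blank_index : Int) (out : List Int) : Prop := out = collapse_ctc_tokens_alt token_ids blank_index
instance (token_ids : List Int) (blank_index : Int) (out : List Int) : Decidable (Spec_collapse_ctc_tokens token_ids blank_index out) := by unfold Spec_collapse_ctc_tokens; infer_instance

-- ===== CLAIM (what is proved, stated in full; the proofs are below) =====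
def Claim_equal_collapse_ctc_tokens : Prop := ∀ (token_ids : List Int) (blank_index : Int), Dom_collapse_ctc_tokens token_ids blank_index → Spec_collapse_ctc_tokens token_ids blank_index (collapse_ctc_tokens token_ids blank_index)

-- ===== LEMMAS AND PROOFS =====

-- reference linear description of the run keys (first element of each maximal run)
def runKeys : List Int → List Int
  | [] => []
  | [x] => [x]
  | x :: y :: xs => if x = y then runKeys (y :: xs) else x :: runKeys (y :: xs)

theorem head?_runKeys (a : Int) (l : List Int) : (runKeys (a :: l)).head? = some a := by
  induction l generalizing a with
  | nil => simp [runKeys]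
  | cons b bs ih =>
    by_cases h : a = b
    · subst h; simpa [runKeys] using ih a
    · simp [runKeys, h]

theorem runKeys_cons_eq (a : Int) (l : List Int) :
    runKeys (a :: l) = a :: (runKeys (a :: l)).tail := by
  have h := head?_runKeys a l
  cases hk : runKeys (a :: l) with
  | nil => rw [hk] at h; simp at h
  | cons c cs => rw [hk] at h; simp at h; simp [h]

theorem runKeys_append (A B : List Int) (hA : A ≠ []) (hB : B ≠ []) :
    runKeys (A ++ B) =
      runKeys A ++ (if A.getLast? = B.head? then (runKeys B).tail else runKeys B) := by
  induction A with
  | nil => exact absurd rfl hA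
  | cons x xs ih =>
    cases xs with
    | nil =>
      cases B with
      | nil => exact absurd rfl hB
      | cons y ys =>
        by_cases h : x = y
        · subst h
          simp only [List.cons_append, List.nil_append, runKeys]
          rw [runKeys_cons_eq x ys]
          simp
        · simp [runKeys, h]
    | cons z zs =>
      have ih' := ih (by simp)
      by_cases h : x = z
      · subst h
        simp only [List.cons_append, runKeys] at *
        rw [ih']
        simp
      · simp only [List.cons_append, runKeys, if_neg h] at *
        rw [ih']
        simp [List.getLast?_cons_cons]

theorem dcKeys_eq_runKeys_aux (n : Nat) : ∀ xs : List Int, xs.length ≤ n → dcKeys xs = runKeys xs := by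
  induction n with
  | zero =>
    intro xs hn
    have : xs = [] := by cases xs <;> simp_all
    subst this
    rw [dcKeys, dif_pos (by simp)]
    rfl
  | succ n ih =>
    intro xs hn
    by_cases h : xs.length ≤ 1
    · rw [dcKeys, dif_pos h]
      match xs, h with
      | [], _ => rfl
      | [x], _ => rfl
    · rw [dcKeys, dif_neg h]
      have hlen : 2 ≤ xs.length := by omega
      have hmid1 : 1 ≤ xs.length / 2 := by omega
      have hmid2 : xs.length / 2 < xs.length := by omega
      show dcKeys (xs.take (xs.length / 2)) ++
          (if PySem.List.pyGet? xs ((xs.length / 2 : Nat) : Int) =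
              PySem.List.pyGet? xs (((xs.length / 2 : Nat) : Int) - 1)
           then (dcKeys (xs.drop (xs.length / 2))).tail
           else dcKeys (xs.drop (xs.length / 2))) = runKeys xs
      have hget1 : PySem.List.pyGet? xs ((xs.length / 2 : Nat) : Int) = (xs.drop (xs.length / 2)).head? := by
        rw [PySem.List.pyGet?_natCast]
        simp [List.head?_drop]
      have hget2 : PySem.List.pyGet? xs (((xs.length / 2 : Nat) : Int) - 1) = (xs.take (xs.length / 2)).getLast? := by
        have hc : (((xs.length / 2 : Nat) : Int) - 1) = ((xs.length / 2 - 1 : Nat) : Int) := by omega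
        rw [hc, PySem.List.pyGet?_natCast, List.getLast?_eq_getElem?, List.length_take]
        have hm : min (xs.length / 2) xs.length = xs.length / 2 := by omega
        rw [hm, List.getElem?_take_of_lt (by omega)]
      have htdnil : xs.drop (xs.length / 2) ≠ [] := by
        simp only [ne_eq, List.drop_eq_nil_iff]; omega
      have htknil : xs.take (xs.length / 2) ≠ [] := by
        intro hnil
        have hl := congrArg List.length hnil
        simp only [List.length_take, List.length_nil] at hl
        omega
      have hsplit : xs = xs.take (xs.length / 2) ++ xs.drop (xs.length / 2) :=
        (List.take_append_drop (xs.length / 2) xs).symm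
      conv_rhs => rw [hsplit]
      rw [runKeys_append _ _ htknil htdnil,
          ih (xs.take (xs.length / 2)) (by simp only [List.length_take]; omega),
          ih (xs.drop (xs.length / 2)) (by simp only [List.length_drop]; omega),
          hget1, hget2]
      by_cases hc : (xs.take (xs.length / 2)).getLast? = (xs.drop (xs.length / 2)).head? <;>
        simp [hc, eq_comm]

theorem dcKeys_eq_runKeys (xs : List Int) : dcKeys xs = runKeys xs :=
  dcKeys_eq_runKeys_aux xs.length xs le_rfl

-- A's loop result, with the accumulator factored out
def filterRun (b : Int) (prev : Option Int) : List Int → List Int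
  | [] => []
  | t :: ts => (if t ≠ b ∧ some t ≠ prev then [t] else []) ++ filterRun b (some t) ts

theorem ctcLoopA_eq_filterRun (b : Int) (ts : List Int) :
    ∀ acc prev, ctcLoopA b acc prev ts = acc ++ filterRun b prev ts := by
  induction ts with
  | nil => intro acc prev; simp [ctcLoopA, filterRun]
  | cons t ts ih =>
    intro acc prev
    simp only [ctcLoopA, filterRun, ih]
    split <;> simp

theorem filterRun_eq_runKeys (b : Int) :
    ∀ ts : List Int, ∀ prev : Option Int,
      (∀ h, ts.head? = some h → some h ≠ prev) →
      filterRun b prev ts = (runKeys ts).filter (fun k => k ≠ b) := by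
  intro ts
  induction ts using runKeys.induct with
  | case1 => intro prev _; simp [filterRun, runKeys]
  | case2 x =>
    intro prev hp
    have hx : some x ≠ prev := hp x rfl
    simp [filterRun, runKeys, hx]
    by_cases hb : x = b <;> simp [hb]
  | case3 x xs ih =>
    intro prev hp
    have h1 : filterRun b prev (x :: x :: xs) = filterRun b prev (x :: xs) := by
      simp [filterRun]
    rw [h1, ih prev hp, runKeys]
    simp
  | case4 x y xs hxy ih =>
    intro prev hp
    have hx : some x ≠ prev := hp x rfl
    have hy : some y ≠ some x := by simpa using Ne.symm hxy
    have h2 := ih (some x) (by intro h hh; simp at hh; subst hh; exact hy)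
    conv_lhs => rw [filterRun]
    rw [h2, runKeys, if_neg hxy]
    by_cases hb : x = b <;> simp [hb, hx]

-- ===== VERDICT (by name: the statement is the Claim_ definition above) =====
theorem collapse_ctc_tokens_spec : Claim_equal_collapse_ctc_tokens := by
  intro token_ids blank_index _
  unfold Spec_collapse_ctc_tokens collapse_ctc_tokens collapse_ctc_tokens_alt
  rw [ctcLoopA_eq_filterRun, dcKeys_eq_runKeys, filterRun_eq_runKeys]
  · simp
  · intro h _; simp
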